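-- pv_equiv track=rewrite | github.com/Aasthaengg/IBMdataset | Python_codes/p02913/s012903461.py | z_algorithm
-- ===== SOURCE A (Python) =====
-- def z_algorithm(s):
--     ma = 0
--     prefix = [0]*len(s)
--     j = 0
--     for i in range(1,len(s)):
--         if i+prefix[i-j] < j+prefix[j]:
--             prefix[i] = prefix[i-j]
--         else:
--             k = max(0,j+prefix[j]-i)
--             while i+k < len(s) and s[k] == s[i+k]:
--                 k += 1
--             prefix[i] = k
--             j = i
--     prefix[0] = len(s)
--     for i,pi in enumerate(prefix):
--         if i < pi:
--             prefix[i] = i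
--     for i in prefix:
--         if ma < i:
--             ma = i
--     return ma
-- ===== SOURCE B (Python) =====
-- def z_algorithm(s):
--     n = len(s)
--     best = 0
--     for i in range(1, n):
--         k = 0
--         while i + k < n and s[k] == s[i + k]:
--             k += 1
--         if min(k, i) > best:
--             best = min(k, i)
--     return best
-- ===== Notes on version B (the rewrite author's own statement) =====
-- stated objective: simpler
-- what changed: Replaces the amortized Z-box bookkeeping (prefix array, box index j, the prefix[i-j] copy shortcut and the two post-processing passes) with a direct naive scan that, for each shift i, matches the prefix character by character and keeps the running maximum of min(k, i).
-- outside the precondition, e.g. on z_algorithm(''): A raises IndexError, B returns 0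
import Mathlib
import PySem

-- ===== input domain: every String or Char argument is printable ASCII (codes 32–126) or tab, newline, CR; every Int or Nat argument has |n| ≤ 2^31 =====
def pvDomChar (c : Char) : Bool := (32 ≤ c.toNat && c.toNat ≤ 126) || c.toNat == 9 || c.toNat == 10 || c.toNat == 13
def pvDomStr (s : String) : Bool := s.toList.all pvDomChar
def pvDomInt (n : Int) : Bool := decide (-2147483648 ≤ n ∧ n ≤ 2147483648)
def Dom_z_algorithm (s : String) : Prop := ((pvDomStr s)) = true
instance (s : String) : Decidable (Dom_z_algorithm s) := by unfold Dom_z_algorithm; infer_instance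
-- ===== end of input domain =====

-- B replaces A's amortized Z-box loop (prefix array, box index j, copy shortcut, two post-passes)
-- by a plain naive prefix-matching scan keeping a running maximum; simpler, not faster.
-- A raises IndexError on the empty string (prefix[0] = len(s) on an empty list): excluded by Pre_ (B's own algorithm returns 0 there).

-- ===== PORT A =====
-- the inner "while i+k < len(s) and s[k] == s[i+k]: k += 1" loop of A
def aWhile (l : List Char) (i k : Nat) : Nat :=
  if i + k < l.length ∧ l[k]? = l[i + k]? then aWhile l i (k + 1) else k
termination_by l.length - (i + k)
decreasing_by omega

-- body of A's main "for i in range(1, len(s))" loop; state = (prefix, j)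
-- max(0, j + prefix[j] - i) is Nat truncated subtraction
def aStep (l : List Char) (st : List Nat × Nat) (i : Nat) : List Nat × Nat :=
  let P := st.1; let j := st.2
  if i + P.getD (i - j) 0 < j + P.getD j 0 then
    (P.set i (P.getD (i - j) 0), j)
  else
    let k := aWhile l i (j + P.getD j 0 - i)
    (P.set i k, i)

-- body of A's "for i, pi in enumerate(prefix): if i < pi: prefix[i] = i" pass
-- (reads the live list as Python does; each write at i happens before any later read)
def capStep : List Nat → Nat → List Nat := fun pr i => if i < pr.getD i 0 then pr.set i i else pr

def z_algorithm (s : String) : Int :=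
  let l := s.toList
  let n := l.length
  let st := (List.range' 1 (n - 1)).foldl (aStep l) (List.replicate n 0, 0)
  let P1 := st.1.set 0 n                                        -- prefix[0] = len(s)
  let P2 := (List.range n).foldl capStep P1
  let ma := P2.foldl (fun ma x => if ma < x then x else ma) 0   -- for i in prefix: if ma < i: ma = i
  (ma : Int)

-- ===== PORT B =====
-- the inner "while i+k < n and s[k] == s[i+k]: k += 1" loop of B
def bMatch (l : List Char) (i k : Nat) : Nat :=
  if i + k < l.length ∧ l[k]? = l[i + k]? then bMatch l i (k + 1) else k
termination_by l.length - (i + k)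
decreasing_by omega

def z_algorithm_alt (s : String) : Int :=
  let l := s.toList
  let n := l.length
  ((List.range' 1 (n - 1)).foldl
    (fun best i =>
      let k := bMatch l i 0
      if best < min k i then min k i else best) 0 : Nat)

-- ===== PRECONDITION & SPEC =====
-- Pre_ excludes only the empty string, on which A raises IndexError (prefix[0] = len(s) on the empty list).
def Pre_z_algorithm (s : String) : Prop := s ≠ ""
instance (s : String) : Decidable (Pre_z_algorithm s) := by unfold Pre_z_algorithm; infer_instance
def pvWitness_z_algorithm : String := "abaab"

def Spec_z_algorithm (s : String) (out : Int) : Prop := out = z_algorithm_alt s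
instance (s : String) (out : Int) : Decidable (Spec_z_algorithm s out) := by unfold Spec_z_algorithm; infer_instance

-- ===== CLAIM (what is proved, stated in full; the proofs are below) =====
def Claim_equal_z_algorithm : Prop := ∀ (s : String), Dom_z_algorithm s → Pre_z_algorithm s → Spec_z_algorithm s (z_algorithm s)

-- ===== LEMMAS AND PROOFS =====

theorem aWhile_matches (l : List Char) (i k : Nat) :
    ∀ t, k ≤ t → t < aWhile l i k → i + t < l.length ∧ l[t]? = l[i + t]? := by
  fun_induction aWhile l i k with
  | case1 k h ih =>
    intro t ht hlt
    rcases Nat.eq_or_lt_of_le ht with rfl | h2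
    · exact h
    · exact ih t h2 hlt
  | case2 k h => intro t ht hlt; omega

theorem aWhile_stop (l : List Char) (i k : Nat) :
    ¬(i + aWhile l i k < l.length ∧ l[aWhile l i k]? = l[i + aWhile l i k]?) := by
  fun_induction aWhile l i k with
  | case1 k h ih => exact ih
  | case2 k h => exact h

theorem aWhile_le (l : List Char) (i k : Nat) (h : i + k ≤ l.length) :
    i + aWhile l i k ≤ l.length := by
  fun_induction aWhile l i k with
  | case1 k hc ih => exact ih (by omega)
  | case2 k hc => exact h

theorem aWhile_succ (l : List Char) (i k : Nat)
    (hc : i + k < l.length ∧ l[k]? = l[i + k]?) : aWhile l i k = aWhile l i (k + 1) := by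
  conv_lhs => rw [aWhile]
  rw [if_pos hc]

theorem aWhile_shift (l : List Char) (i : Nat) :
    ∀ k, (∀ t, t < k → i + t < l.length ∧ l[t]? = l[i + t]?) → aWhile l i 0 = aWhile l i k := by
  intro k
  induction k with
  | zero => intro _; rfl
  | succ k ih =>
    intro h
    rw [ih (fun t ht => h t (by omega)), aWhile_succ l i k (h k (by omega))]

theorem z_unique (l : List Char) (i k : Nat)
    (h1 : ∀ t, t < k → i + t < l.length ∧ l[t]? = l[i + t]?)
    (h2 : ¬(i + k < l.length ∧ l[k]? = l[i + k]?)) : aWhile l i 0 = k := by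
  rw [aWhile_shift l i k h1]
  conv_lhs => rw [aWhile]
  rw [if_neg h2]

theorem z_copy (l : List Char) (i j : Nat) (hj : 1 ≤ j) (hji : j < i) (hin : i < l.length)
    (hlt : i + aWhile l (i - j) 0 < j + aWhile l j 0) :
    aWhile l i 0 = aWhile l (i - j) 0 := by
  set zj := aWhile l j 0 with hzj
  set zr := aWhile l (i - j) 0 with hzr
  have hjn : j + zj ≤ l.length := aWhile_le l j 0 (by omega)
  have Mj := aWhile_matches l j 0
  have Mr := aWhile_matches l (i - j) 0
  have Sr := aWhile_stop l (i - j) 0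
  apply z_unique
  · intro t ht
    refine ⟨by omega, ?_⟩
    have e1 : l[t]? = l[(i - j) + t]? := (Mr t (by omega) ht).2
    have hu : (i - j) + t < zj := by omega
    have e2 : l[(i - j) + t]? = l[j + ((i - j) + t)]? := (Mj ((i - j) + t) (by omega) hu).2
    have e3 : j + ((i - j) + t) = i + t := by omega
    rw [e1, e2, e3]
  · rintro ⟨_, he⟩
    have hrn : (i - j) + zr < l.length := by omega
    rw [← hzr] at Sr
    have hne : l[zr]? ≠ l[(i - j) + zr]? := fun h => Sr ⟨hrn, h⟩
    have hu : (i - j) + zr < zj := by omega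
    have e2 : l[(i - j) + zr]? = l[j + ((i - j) + zr)]? := (Mj ((i - j) + zr) (by omega) hu).2
    have e3 : j + ((i - j) + zr) = i + zr := by omega
    rw [e2, e3] at hne
    exact hne he

theorem z_else (l : List Char) (i j : Nat) (hji : j < i) (hin : i < l.length)
    (hge : j + aWhile l j 0 ≤ i + aWhile l (i - j) 0) :
    aWhile l i (j + aWhile l j 0 - i) = aWhile l i 0 := by
  set zj := aWhile l j 0 with hzj
  set zr := aWhile l (i - j) 0 with hzr
  have hjn : j + zj ≤ l.length := aWhile_le l j 0 (by omega)
  have Mj := aWhile_matches l j 0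
  have Mr := aWhile_matches l (i - j) 0
  refine (aWhile_shift l i (j + zj - i) ?_).symm
  intro t ht
  refine ⟨by omega, ?_⟩
  have e1 : l[t]? = l[(i - j) + t]? := (Mr t (by omega) (by omega)).2
  have e2 : l[(i - j) + t]? = l[j + ((i - j) + t)]? := (Mj ((i - j) + t) (by omega) (by omega)).2
  have e3 : j + ((i - j) + t) = i + t := by omega
  rw [e1, e2, e3]

theorem getD_set_nat (l : List Nat) (i j a : Nat) :
    (l.set i a).getD j 0 = if i = j ∧ i < l.length then a else l.getD j 0 := by
  simp [List.getD, List.getElem?_set]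
  split_ifs with h1 h2 h3 <;> simp_all
  omega

def zInv (l : List Char) (m : Nat) (st : List Nat × Nat) : Prop :=
  st.1.length = l.length ∧ st.2 ≤ m ∧
  (∀ t, (t = 0 ∨ m < t) → st.1.getD t 0 = 0) ∧
  (∀ t, 1 ≤ t → t ≤ m → st.1.getD t 0 = aWhile l t 0)

theorem inv_step (l : List Char) (m : Nat) (st : List Nat × Nat)
    (hin : m + 1 < l.length) (h : zInv l m st) : zInv l (m + 1) (aStep l st (m + 1)) := by
  obtain ⟨P, j⟩ := st
  obtain ⟨hlen, hjm, hzero, hval⟩ := h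
  simp only at hlen hjm hzero hval
  by_cases hj : j = 0
  · subst hj
    have hP0 : P.getD 0 0 = 0 := hzero 0 (Or.inl rfl)
    have hPi : P.getD (m + 1 - 0) 0 = 0 := hzero (m + 1 - 0) (by omega)
    simp only [aStep, hP0, hPi]
    rw [if_neg (by omega)]
    refine ⟨by simpa using hlen, by omega, ?_, ?_⟩
    · intro t ht
      rw [getD_set_nat]
      rw [if_neg (by omega)]
      exact hzero t (by omega)
    · intro t h1 h2
      rw [getD_set_nat]
      by_cases he : t = m + 1
      · subst he
        rw [if_pos ⟨rfl, by omega⟩]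
        simp
      · rw [if_neg (by omega)]
        exact hval t h1 (by omega)
  · have hj1 : 1 ≤ j := by omega
    have hPj : P.getD j 0 = aWhile l j 0 := hval j hj1 hjm
    have hPij : P.getD (m + 1 - j) 0 = aWhile l (m + 1 - j) 0 := hval _ (by omega) (by omega)
    simp only [aStep, hPj, hPij]
    by_cases hc : m + 1 + aWhile l (m + 1 - j) 0 < j + aWhile l j 0
    · rw [if_pos hc]
      have hcopy : aWhile l (m + 1) 0 = aWhile l (m + 1 - j) 0 :=
        z_copy l (m + 1) j hj1 (by omega) hin hc
      refine ⟨by simpa using hlen, by omega, ?_, ?_⟩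
      · intro t ht
        rw [getD_set_nat, if_neg (by omega)]
        exact hzero t (by omega)
      · intro t h1 h2
        rw [getD_set_nat]
        by_cases he : t = m + 1
        · subst he
          rw [if_pos ⟨rfl, by omega⟩, hcopy]
        · rw [if_neg (by omega)]
          exact hval t h1 (by omega)
    · rw [if_neg hc]
      have helse : aWhile l (m + 1) (j + aWhile l j 0 - (m + 1)) = aWhile l (m + 1) 0 :=
        z_else l (m + 1) j (by omega) hin (by omega)
      refine ⟨by simpa using hlen, by omega, ?_, ?_⟩
      · intro t ht
        rw [getD_set_nat, if_neg (by omega)]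
        exact hzero t (by omega)
      · intro t h1 h2
        rw [getD_set_nat]
        by_cases he : t = m + 1
        · subst he
          rw [if_pos ⟨rfl, by omega⟩, helse]
        · rw [if_neg (by omega)]
          exact hval t h1 (by omega)

theorem loop_inv (l : List Char) : ∀ m, m ≤ l.length - 1 →
    zInv l m ((List.range' 1 m).foldl (aStep l) (List.replicate l.length 0, 0)) := by
  intro m
  induction m with
  | zero =>
    intro _
    simp only [List.range'_zero, List.foldl_nil]
    refine ⟨by simp, by omega, ?_, ?_⟩
    · intro t _
      simp only [List.getD, List.getElem?_replicate]
      split <;> simp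
    · intro t h1 h2; omega
  | succ m ih =>
    intro hm
    rw [List.range'_1_concat, List.foldl_append, List.foldl_cons, List.foldl_nil]
    have h1m : 1 + m = m + 1 := by omega
    rw [h1m]
    exact inv_step l m _ (by omega) (ih (by omega))

theorem bMatch_eq (l : List Char) (i k : Nat) : bMatch l i k = aWhile l i k := by
  fun_induction bMatch l i k with
  | case1 k h ih =>
    rw [← aWhile_succ l i k h] at ih
    exact ih
  | case2 k h => rw [aWhile, if_neg h]

theorem getD_zero_of_ge (P : List Nat) (t : Nat) (h : P.length ≤ t) : P.getD t 0 = 0 := by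
  simp [List.getD, List.getElem?_eq_none (by simpa using h)]

theorem cap_inv (P1 : List Nat) : ∀ m,
    ((List.range m).foldl capStep P1).length = P1.length ∧
    ∀ t, ((List.range m).foldl capStep P1).getD t 0 =
      if t < m then (if t < P1.getD t 0 then t else P1.getD t 0) else P1.getD t 0 := by
  intro m
  induction m with
  | zero => simp
  | succ m ih =>
    obtain ⟨ihl, ihv⟩ := ih
    rw [List.range_succ, List.foldl_append, List.foldl_cons, List.foldl_nil]
    set Q := (List.range m).foldl capStep P1 with hQ
    have hQm : Q.getD m 0 = P1.getD m 0 := by rw [ihv m, if_neg (by omega)]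
    constructor
    · simp only [capStep]
      split <;> simp [ihl]
    · intro t
      simp only [capStep, hQm]
      by_cases h1 : m < P1.getD m 0
      · rw [if_pos h1]
        have hmlen : m < P1.length := by
          by_contra hge
          rw [getD_zero_of_ge P1 m (by omega)] at h1
          omega
        rw [getD_set_nat, ihl]
        by_cases he : m = t
        · subst he
          rw [if_pos ⟨rfl, hmlen⟩, if_pos (by omega), if_pos h1]
        · rw [if_neg (by tauto), ihv t]
          by_cases ht : t < m
          · rw [if_pos ht, if_pos (show t < m + 1 by omega)]
          · rw [if_neg ht, if_neg (show ¬ t < m + 1 by omega)]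
      · rw [if_neg h1, ihv t]
        by_cases ht : t < m
        · rw [if_pos ht, if_pos (show t < m + 1 by omega)]
        · rw [if_neg ht]
          by_cases he : t = m
          · subst he
            rw [if_pos (show t < t + 1 by omega), if_neg h1]
          · rw [if_neg (show ¬ t < m + 1 by omega)]

theorem main_eq (s : String) (h : s.toList ≠ []) : z_algorithm s = z_algorithm_alt s := by
  simp only [z_algorithm, z_algorithm_alt]
  set l := s.toList with hl
  set n := l.length with hn
  have hn1 : 1 ≤ n := by
    rw [hn]
    exact List.length_pos_of_ne_nil h
  obtain ⟨hlen, hjm, hzero, hval⟩ := loop_inv l (n - 1) (le_refl _)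
  set P := ((List.range' 1 (n - 1)).foldl (aStep l) (List.replicate n 0, 0)).1 with hP
  have hPlen : P.length = n := hlen
  set P1 := P.set 0 n with hP1
  have hP1len : P1.length = n := by rw [hP1, List.length_set, hPlen]
  obtain ⟨hcl, hcv⟩ := cap_inv P1 n
  set P2 := (List.range n).foldl capStep P1 with hP2
  have hP2len : P2.length = n := by rw [hcl, hP1len]
  have hP2eq : P2 = 0 :: (List.range' 1 (n - 1)).map
      (fun t => if t < aWhile l t 0 then t else aWhile l t 0) := by
    apply List.ext_getElem
    · simp [hP2len, List.length_range']
      omega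
    · intro t h1 h2
      rw [← List.getD_eq_getElem P2 0 h1, hcv t, if_pos (by omega)]
      match t with
      | 0 =>
        have : P1.getD 0 0 = n := by
          rw [hP1, getD_set_nat, if_pos ⟨rfl, by omega⟩]
        rw [this, if_pos (by omega)]
        simp
      | (t + 1) =>
        have hv : P1.getD (t + 1) 0 = aWhile l (t + 1) 0 := by
          rw [hP1, getD_set_nat, if_neg (by omega)]
          exact hval (t + 1) (by omega) (by omega)
        rw [hv]
        have hr : (List.range' 1 (n - 1))[t]'(by simp [List.length_range']; omega) = 1 + t :=
          List.getElem_range'_1 t (by simp [List.length_range']; omega)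
        simp only [List.getElem_cons_succ, List.getElem_map, hr]
        have : 1 + t = t + 1 := by omega
        rw [this]
  rw [hP2eq, List.foldl_cons]
  have h00 : (if (0 : Nat) < 0 then (0 : Nat) else 0) = 0 := by simp
  rw [h00, List.foldl_map]
  have hfun : (fun (ma t : Nat) =>
        if ma < (if t < aWhile l t 0 then t else aWhile l t 0)
        then (if t < aWhile l t 0 then t else aWhile l t 0) else ma)
      = (fun (best i : Nat) =>
        let k := bMatch l i 0
        if best < min k i then min k i else best) := by
    funext a t
    simp only [bMatch_eq]
    split_ifs <;> omega
  rw [hfun]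

-- ===== VERDICT (by name: the statement is the Claim_ definition above) =====
theorem z_algorithm_spec : Claim_equal_z_algorithm := by
  intro s _ hp
  have hnil : s.toList ≠ [] := by
    intro hx
    exact hp (by simpa using congrArg String.ofList hx)
  show z_algorithm s = z_algorithm_alt s
  exact main_eq s hnil
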